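-- pv_equiv track=rewrite | github.com/Pivink/Leetcode-Problems | three_consecutive_odd.py | check_cosecutive
-- ===== SOURCE A (Python) =====
-- def check_cosecutive(arr):
--     odd=0
--     for i in arr:
--         if i%2==1:
--             odd+=1
--             if odd==3:
--                 return True
--         else:
--             odd=0
--     return False
-- ===== SOURCE B (Python) =====
-- def check_cosecutive(arr):
--     return any(a % 2 == 1 and b % 2 == 1 and c % 2 == 1
--                for a, b, c in zip(arr, arr[1:], arr[2:]))
-- ===== Notes on version B (the rewrite author's own statement) =====
-- stated objective: idiomatic
-- what changed: Replaced the running-odd-counter scan with a one-line sliding window: zip the list with its two shifted copies and check any window of three is all odd.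
import Mathlib
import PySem

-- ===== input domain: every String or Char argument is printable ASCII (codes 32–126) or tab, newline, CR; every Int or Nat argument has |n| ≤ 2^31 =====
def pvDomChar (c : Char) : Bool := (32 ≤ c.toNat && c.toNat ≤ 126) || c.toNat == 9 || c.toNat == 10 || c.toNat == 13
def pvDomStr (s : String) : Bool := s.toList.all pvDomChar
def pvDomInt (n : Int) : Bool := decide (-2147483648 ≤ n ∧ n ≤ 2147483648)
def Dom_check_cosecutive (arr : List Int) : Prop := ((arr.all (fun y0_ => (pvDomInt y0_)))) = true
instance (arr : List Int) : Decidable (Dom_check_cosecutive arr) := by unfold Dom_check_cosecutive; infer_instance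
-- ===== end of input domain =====

-- B replaces A's running-odd-counter scan by a sliding window (zip with the two shifted copies); idiomatic, same O(n) cost.

-- ===== PORT A =====
-- the for-loop with its 'odd' counter and early 'return True'
def checkLoopA : List Int → Int → Bool
  | [], _ => false
  | i :: rest, odd =>
    if PySem.Int.mod i 2 == 1 then
      -- odd += 1; if odd == 3: return True
      if odd + 1 == 3 then true else checkLoopA rest (odd + 1)
    else
      checkLoopA rest 0

def check_cosecutive (arr : List Int) : Bool := checkLoopA arr 0

-- ===== PORT B =====
def check_cosecutive_alt (arr : List Int) : Bool :=
  (arr.zip ((PySem.List.slice arr (some 1) none).zip (PySem.List.slice arr (some 2) none))).any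
    (fun abc => PySem.Int.mod abc.1 2 == 1 && PySem.Int.mod abc.2.1 2 == 1 && PySem.Int.mod abc.2.2 2 == 1)

-- ===== PRECONDITION & SPEC =====
def Spec_check_cosecutive (arr : List Int) (out : Bool) : Prop := out = check_cosecutive_alt arr
instance (arr : List Int) (out : Bool) : Decidable (Spec_check_cosecutive arr out) := by unfold Spec_check_cosecutive; infer_instance

-- ===== CLAIM (what is proved, stated in full; the proofs are below) =====
def Claim_equal_check_cosecutive : Prop := ∀ (arr : List Int), Dom_check_cosecutive arr → Spec_check_cosecutive arr (check_cosecutive arr)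

-- ===== LEMMAS AND PROOFS =====

-- B's window test, after rewriting the slices to drops
def winB (arr : List Int) : Bool :=
  (arr.zip ((arr.drop 1).zip (arr.drop 2))).any
    (fun abc => PySem.Int.mod abc.1 2 == 1 && PySem.Int.mod abc.2.1 2 == 1 && PySem.Int.mod abc.2.2 2 == 1)

theorem alt_eq_winB (arr : List Int) : check_cosecutive_alt arr = winB arr := by
  unfold check_cosecutive_alt winB
  rw [show ((1 : Int) = ((1 : Nat) : Int)) from rfl, show ((2 : Int) = ((2 : Nat) : Int)) from rfl,
      PySem.List.slice_from_natCast, PySem.List.slice_from_natCast]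

theorem winB_cons3 (a b c : Int) (r : List Int) :
    winB (a :: b :: c :: r) =
      ((PySem.Int.mod a 2 == 1 && PySem.Int.mod b 2 == 1 && PySem.Int.mod c 2 == 1) || winB (b :: c :: r)) := by
  simp only [winB, List.drop_succ_cons, List.drop_zero, List.zip_cons_cons, List.any_cons]

theorem winB_cons_even (x : Int) (l : List Int) (hx : (PySem.Int.mod x 2 == 1) = false) :
    winB (x :: l) = winB l := by
  match l with
  | [] => rfl
  | [b] => rfl
  | b :: c :: r =>
    rw [winB_cons3, hx]
    simp only [Bool.false_and, Bool.false_or]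

theorem winB_mid_even (a x : Int) (l : List Int) (hx : (PySem.Int.mod x 2 == 1) = false) :
    winB (a :: x :: l) = winB l := by
  match l with
  | [] => rfl
  | c :: r =>
    rw [winB_cons3, hx]
    simp only [Bool.and_false, Bool.false_and, Bool.false_or]
    exact winB_cons_even x (c :: r) hx

theorem loopA_key (arr : List Int) :
    checkLoopA arr 0 = winB arr ∧
    (∀ a : Int, (PySem.Int.mod a 2 == 1) = true → checkLoopA arr 1 = winB (a :: arr)) ∧
    (∀ a b : Int, (PySem.Int.mod a 2 == 1) = true → (PySem.Int.mod b 2 == 1) = true →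
      checkLoopA arr 2 = winB (a :: b :: arr)) := by
  induction arr with
  | nil =>
    exact ⟨rfl, fun a _ => rfl, fun a b _ _ => rfl⟩
  | cons x rest ih =>
    obtain ⟨ih0, ih1, ih2⟩ := ih
    rcases hx : (PySem.Int.mod x 2 == 1) with _ | _
    · -- x even
      have e : ∀ k : Int, checkLoopA (x :: rest) k = checkLoopA rest 0 := by
        intro k; simp only [checkLoopA, hx, Bool.false_eq_true, if_false]
      refine ⟨?_, fun a ha => ?_, fun a b ha hb => ?_⟩
      · rw [e, ih0, winB_cons_even x rest hx]
      · rw [e, ih0, winB_mid_even a x rest hx]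
      · rw [e, ih0, ← winB_cons_even x rest hx, winB_cons3, hx]
        simp only [Bool.and_false, Bool.false_or]
        rw [winB_cons_even x rest hx]
        exact (winB_mid_even b x rest hx).symm
    · -- x odd
      refine ⟨?_, fun a ha => ?_, fun a b ha hb => ?_⟩
      · have e : checkLoopA (x :: rest) 0 = checkLoopA rest 1 := by
          simp only [checkLoopA, hx, if_true]
          norm_num
        rw [e]; exact ih1 x hx
      · have e : checkLoopA (x :: rest) 1 = checkLoopA rest 2 := by
          simp only [checkLoopA, hx, if_true]
          norm_num
        rw [e]; exact ih2 a x ha hx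
      · have e : checkLoopA (x :: rest) 2 = true := by
          simp only [checkLoopA, hx, if_true]
          norm_num
        rw [e, winB_cons3, ha, hb, hx]
        simp only [Bool.and_self, Bool.true_or]

-- ===== VERDICT (by name: the statement is the Claim_ definition above) =====
theorem check_cosecutive_spec : Claim_equal_check_cosecutive := by
  intro arr _
  unfold Spec_check_cosecutive check_cosecutive
  rw [alt_eq_winB]
  exact (loopA_key arr).1
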